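-- pv_equiv track=rewrite | github.com/pikuch/AOC20 | Day16.py | get_invalid_values
-- ===== SOURCE A (Python) =====
-- def is_within_field_ranges(value, field):
--     within = False
--     for field_range in field:
--         if field_range[0] <= value <= field_range[1]:
--             within = True
--             break
--     return within
--
-- def get_invalid_values(tickets, field_ranges):
--     invalid_value_list = []
--     valid_tickets = []
--     for ticket in tickets:
--         is_ticket_valid = True
--         for value in ticket:
--             is_valid = False
--             for field in field_ranges.values():
--                 if is_within_field_ranges(value, field):
--                     is_valid = True
--                     break
--             if not is_valid:
--                 invalid_value_list.append(value)
--                 is_ticket_valid = False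
--         if is_ticket_valid:
--             valid_tickets.append(ticket)
--
--     return invalid_value_list, valid_tickets
-- ===== SOURCE B (Python) =====
-- def get_invalid_values(tickets, field_ranges):
--     # Preprocess: merge all field ranges into sorted disjoint intervals once,
--     # then each value is checked against the (usually much shorter) merged list.
--     all_ranges = [r for f in field_ranges.values() for r in f]
--     all_ranges.sort(key=lambda r: r[0])
--     merged = []
--     for lo, hi in all_ranges:
--         if merged and lo <= merged[-1][1]:
--             last_lo, last_hi = merged[-1]
--             merged[-1] = (last_lo, max(last_hi, hi))
--         else:
--             merged.append((lo, hi))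
--     invalid_value_list = []
--     valid_tickets = []
--     for ticket in tickets:
--         bad = [v for v in ticket if not any(lo <= v <= hi for lo, hi in merged)]
--         if bad:
--             invalid_value_list.extend(bad)
--         else:
--             valid_tickets.append(ticket)
--     return invalid_value_list, valid_tickets
-- ===== Notes on version B (the rewrite author's own statement) =====
-- stated objective: faster
-- what changed: B flattens all field ranges once, sorts and merges them into disjoint intervals, then checks each ticket value against the short merged list, replacing A's per-value scan over every field's every range with its break flags.
import Mathlib
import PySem

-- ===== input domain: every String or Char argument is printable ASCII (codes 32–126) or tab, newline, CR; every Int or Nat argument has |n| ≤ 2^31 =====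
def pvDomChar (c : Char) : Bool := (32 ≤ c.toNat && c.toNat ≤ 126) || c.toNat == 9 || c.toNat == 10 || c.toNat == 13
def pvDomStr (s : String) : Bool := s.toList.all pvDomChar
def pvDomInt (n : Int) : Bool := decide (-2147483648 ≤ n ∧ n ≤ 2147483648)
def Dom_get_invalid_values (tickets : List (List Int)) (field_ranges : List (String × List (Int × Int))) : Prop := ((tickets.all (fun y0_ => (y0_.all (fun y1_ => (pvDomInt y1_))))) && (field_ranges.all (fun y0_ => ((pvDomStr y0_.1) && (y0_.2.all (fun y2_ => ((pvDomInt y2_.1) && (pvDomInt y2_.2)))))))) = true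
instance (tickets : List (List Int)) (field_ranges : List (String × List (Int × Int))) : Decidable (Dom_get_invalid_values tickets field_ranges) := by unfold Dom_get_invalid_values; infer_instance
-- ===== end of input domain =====

-- B preprocesses the field ranges into sorted disjoint merged intervals once and checks each value against that short list instead of scanning every range of every field (measurably faster on the generated inputs).
-- ===== PORT A =====
def pvIsWithin (value : Int) (field : List (Int × Int)) : Bool :=
  match field with
  | [] => false
  | fr :: rest =>
    if fr.1 ≤ value ∧ value ≤ fr.2 then true
    else pvIsWithin value rest

def pvAnyField (value : Int) (fields : List (List (Int × Int))) : Bool :=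
  match fields with
  | [] => false
  | f :: rest =>
    if pvIsWithin value f then true
    else pvAnyField value rest

def get_invalid_values (tickets : List (List Int)) (field_ranges : List (String × List (Int × Int))) : List Int × List (List Int) :=
  let fields := field_ranges.map (·.2)
  let st := tickets.foldl (fun (st : List Int × List (List Int)) ticket =>
    let inner := ticket.foldl (fun (p : List Int × Bool) value =>
      if pvAnyField value fields then p else (p.1 ++ [value], false)) (st.1, true)
    if inner.2 then (inner.1, st.2 ++ [ticket]) else (inner.1, st.2)) ([], [])
  st


-- ===== PORT B =====
def pvMergeRev (acc : List (Int × Int)) (rs : List (Int × Int)) : List (Int × Int) :=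
  match rs with
  | [] => acc
  | (lo, hi) :: rest =>
    match acc with
    | (llo, lhi) :: accT =>
      if lo ≤ lhi then pvMergeRev ((llo, max lhi hi) :: accT) rest
      else pvMergeRev ((lo, hi) :: (llo, lhi) :: accT) rest
    | [] => pvMergeRev [(lo, hi)] rest

def pvCovered (v : Int) (merged : List (Int × Int)) : Bool :=
  merged.any (fun r => decide (r.1 ≤ v) && decide (v ≤ r.2))

def get_invalid_values_alt (tickets : List (List Int)) (field_ranges : List (String × List (Int × Int))) : List Int × List (List Int) :=
  let all_ranges := field_ranges.flatMap (·.2)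
  let merged := (pvMergeRev [] (PySem.List.sorted all_ranges (·.1) false)).reverse
  tickets.foldl (fun (st : List Int × List (List Int)) ticket =>
    let bad := ticket.filter (fun v => ! pvCovered v merged)
    if bad.isEmpty then (st.1, st.2 ++ [ticket]) else (st.1 ++ bad, st.2)) ([], [])


-- ===== PRECONDITION & SPEC =====
def Spec_get_invalid_values (tickets : List (List Int)) (field_ranges : List (String × List (Int × Int))) (out : List Int × List (List Int)) : Prop := out = get_invalid_values_alt tickets field_ranges
instance (tickets : List (List Int)) (field_ranges : List (String × List (Int × Int))) (out : List Int × List (List Int)) : Decidable (Spec_get_invalid_values tickets field_ranges out) := by unfold Spec_get_invalid_values; infer_instance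

-- ===== CLAIM (what is proved, stated in full; the proofs are below) =====
def Claim_equal_get_invalid_values : Prop := ∀ (tickets : List (List Int)) (field_ranges : List (String × List (Int × Int))), Dom_get_invalid_values tickets field_ranges → Spec_get_invalid_values tickets field_ranges (get_invalid_values tickets field_ranges)

-- ===== LEMMAS AND PROOFS =====

-- cover of a list of ranges, as a proposition
def pvCov (v : Int) (rs : List (Int × Int)) : Prop := ∃ r ∈ rs, r.1 ≤ v ∧ v ≤ r.2

lemma pvCovered_iff (v : Int) (rs : List (Int × Int)) : pvCovered v rs = true ↔ pvCov v rs := by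
  simp [pvCovered, pvCov, List.any_eq_true]

lemma pvCov_nil (v : Int) : pvCov v [] ↔ False := by simp [pvCov]

lemma pvCov_cons (v : Int) (r : Int × Int) (rs : List (Int × Int)) :
    pvCov v (r :: rs) ↔ (r.1 ≤ v ∧ v ≤ r.2) ∨ pvCov v rs := by
  simp [pvCov]

-- merging preserves the covered set, given that every remaining range starts
-- no earlier than the last merged interval does
lemma pvMergeRev_cov (v : Int) :
    ∀ (rs acc : List (Int × Int)),
    rs.Pairwise (fun a b => a.1 ≤ b.1) →
    (∀ r ∈ rs, ∀ p ∈ acc.head?, p.1 ≤ r.1) →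
    (pvCov v (pvMergeRev acc rs) ↔ pvCov v acc ∨ pvCov v rs) := by
  intro rs
  induction rs with
  | nil => intro acc _ _; simp [pvMergeRev, pvCov_nil]
  | cons r rest ih =>
    intro acc hpw hinv
    obtain ⟨lo, hi⟩ := r
    have hrest_pw := hpw.of_cons
    have hlo_le : ∀ s ∈ rest, lo ≤ s.1 := by
      intro s hs; exact (List.pairwise_cons.mp hpw).1 s hs
    match acc with
    | [] =>
      rw [show pvMergeRev [] ((lo, hi) :: rest) = pvMergeRev [(lo, hi)] rest from rfl]
      rw [ih [(lo, hi)] hrest_pw (by intro s hs p hp; simp at hp; subst hp; exact hlo_le s hs)]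
      simp only [pvCov_cons, pvCov_nil]; tauto
    | (llo, lhi) :: accT =>
      have hllo : llo ≤ lo := hinv (lo, hi) (by simp) (llo, lhi) (by simp)
      by_cases hle : lo ≤ lhi
      · rw [show pvMergeRev ((llo, lhi) :: accT) ((lo, hi) :: rest)
              = pvMergeRev ((llo, max lhi hi) :: accT) rest by simp [pvMergeRev, hle]]
        rw [ih ((llo, max lhi hi) :: accT) hrest_pw
              (by intro s hs p hp; simp at hp; subst hp; exact le_trans hllo (hlo_le s hs))]
        have hiff : (llo ≤ v ∧ v ≤ max lhi hi) ↔ ((llo ≤ v ∧ v ≤ lhi) ∨ (lo ≤ v ∧ v ≤ hi)) := by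
          constructor
          · rintro ⟨h1, h2⟩
            rcases le_max_iff.mp h2 with h | h
            · exact Or.inl ⟨h1, h⟩
            · by_cases hv : v ≤ lhi
              · exact Or.inl ⟨h1, hv⟩
              · exact Or.inr ⟨by omega, h⟩
          · rintro (⟨h1, h2⟩ | ⟨h1, h2⟩)
            · exact ⟨h1, le_trans h2 (le_max_left _ _)⟩
            · exact ⟨by omega, le_trans h2 (le_max_right _ _)⟩
        simp only [pvCov_cons]
        rw [hiff]
        tauto
      · rw [show pvMergeRev ((llo, lhi) :: accT) ((lo, hi) :: rest)
              = pvMergeRev ((lo, hi) :: (llo, lhi) :: accT) rest by simp [pvMergeRev, hle]]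
        rw [ih ((lo, hi) :: (llo, lhi) :: accT) hrest_pw
              (by intro s hs p hp; simp at hp; subst hp; exact hlo_le s hs)]
        simp only [pvCov_cons]; tauto

lemma pvIsWithin_any (v : Int) (f : List (Int × Int)) :
    pvIsWithin v f = f.any (fun r => decide (r.1 ≤ v) && decide (v ≤ r.2)) := by
  induction f with
  | nil => rfl
  | cons r rest ih =>
    by_cases h : r.1 ≤ v ∧ v ≤ r.2 <;> simp [pvIsWithin, h, ih]

-- A's nested validity test equals one test over the flattened range list
lemma pvAnyField_eq_flat (v : Int) (frs : List (String × List (Int × Int))) :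
    pvAnyField v (frs.map (·.2)) = pvCovered v (frs.flatMap (·.2)) := by
  induction frs with
  | nil => rfl
  | cons p rest ih =>
    simp only [List.map_cons, List.flatMap_cons, pvAnyField]
    rw [pvIsWithin_any]
    by_cases h : p.2.any (fun r => decide (r.1 ≤ v) && decide (v ≤ r.2)) = true
    · simp [pvCovered, List.any_append, h]
    · rw [if_neg h, ih]
      simp [pvCovered, List.any_append, h]

-- B's merged interval list covers exactly what the raw range list covers
lemma pvCovered_merged (v : Int) (rs : List (Int × Int)) :
    pvCovered v ((pvMergeRev [] (PySem.List.sorted rs (·.1) false)).reverse) = pvCovered v rs := by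
  have h1 : pvCovered v ((pvMergeRev [] (PySem.List.sorted rs (·.1) false)).reverse)
      = pvCovered v (pvMergeRev [] (PySem.List.sorted rs (·.1) false)) := by
    simp [pvCovered, List.any_reverse]
  have h2 := pvMergeRev_cov v (PySem.List.sorted rs (·.1) false) []
    (PySem.List.sorted_pairwise rs (·.1))
    (by intro r hr p hp; simp at hp)
  have h3 : pvCov v (PySem.List.sorted rs (·.1) false) ↔ pvCov v rs := by
    simp [pvCov, PySem.List.mem_sorted]
  have hmain : pvCovered v (pvMergeRev [] (PySem.List.sorted rs (·.1) false)) = true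
      ↔ pvCovered v rs = true := by
    rw [pvCovered_iff, h2, pvCov_nil, false_or, h3, ← pvCovered_iff]
  rw [h1]
  cases hb : pvCovered v rs
  · cases ha : pvCovered v (pvMergeRev [] (PySem.List.sorted rs (·.1) false))
    · rfl
    · exfalso
      have := hmain.mp ha
      rw [hb] at this
      exact absurd this Bool.false_ne_true
  · exact hmain.mpr hb

-- A's inner loop over one ticket: appends the invalid values; the flag says all were valid
lemma pvInnerA (fields : List (List (Int × Int))) (vs : List Int) :
    ∀ (inv : List Int) (b : Bool),
    vs.foldl (fun (p : List Int × Bool) value =>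
        if pvAnyField value fields then p else (p.1 ++ [value], false)) (inv, b)
      = (inv ++ vs.filter (fun v => ! pvAnyField v fields),
         b && vs.all (fun v => pvAnyField v fields)) := by
  induction vs with
  | nil => intro inv b; simp
  | cons v rest ih =>
    intro inv b
    by_cases h : pvAnyField v fields = true
    · simp only [List.foldl_cons]
      rw [if_pos h, ih]
      simp [List.all_cons, h]
    · simp only [List.foldl_cons]
      rw [if_neg h, ih]
      simp [List.all_cons, h, List.append_assoc]

-- foldl congruence on the step function
lemma pvFoldlExt {α β : Type} (f g : β → α → β) (h : ∀ b a, f b a = g b a) :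
    ∀ (l : List α) (init : β), l.foldl f init = l.foldl g init := by
  intro l
  induction l with
  | nil => intro init; rfl
  | cons x xs ih => intro init; simp only [List.foldl_cons, h, ih]

-- ===== VERDICT (by name: the statement is the Claim_ definition above) =====
theorem get_invalid_values_spec : Claim_equal_get_invalid_values := by
  intro tickets field_ranges _
  unfold Spec_get_invalid_values get_invalid_values get_invalid_values_alt
  dsimp only
  apply pvFoldlExt
  intro st ticket
  rw [pvInnerA]
  have hfun : (fun v => ! pvCovered v ((pvMergeRev []
        (PySem.List.sorted (field_ranges.flatMap (fun x => x.2)) (fun x => x.1) false)).reverse))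
      = (fun v => ! pvAnyField v (field_ranges.map (fun x => x.2))) := by
    funext v
    rw [pvAnyField_eq_flat, pvCovered_merged]
  rw [hfun]
  dsimp only
  by_cases hall : ticket.all (fun v => pvAnyField v (field_ranges.map (fun x => x.2))) = true
  · have hnil : ticket.filter (fun v => ! pvAnyField v (field_ranges.map (fun x => x.2))) = [] := by
      rw [List.filter_eq_nil_iff]
      intro x hx
      simp [List.all_eq_true.mp hall x hx]
    simp [hall, hnil]
  · have hne : ticket.filter (fun v => ! pvAnyField v (field_ranges.map (fun x => x.2))) ≠ [] := by
      intro hcontra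
      apply hall
      rw [List.all_eq_true]
      intro x hx
      have := List.filter_eq_nil_iff.mp hcontra x hx
      simpa using this
    simp [hall, List.isEmpty_iff, hne]
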